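-- pv_equiv track=rewrite | github.com/txtatech/virtual-forest | virtual-forest/game-code/logic-puzzles/the_bridge_and_torch_problem.py | cross_bridge
-- ===== SOURCE A (Python) =====
-- def cross_bridge(people):
--     # Initialize the total time
--     total_time = 0
--
--     # Sort people by their crossing time in ascending order
--     people.sort()
--
--     while len(people) > 0:
--         # Check if there are two or more people on the starting side
--         if len(people) >= 2:
--             # Send the two fastest people with the flashlight
--             fastest_pair = [people[0], people[1]]
--             time = max(fastest_pair)
--             total_time += time
--
--             # Remove the two people from the starting side
--             people.remove(people[0])
--             people.remove(people[0])
--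
--             # Return the flashlight to the starting side
--             people.append(time)
--
--         else:
--             # Only one person left, send them with the flashlight
--             total_time += people[0]
--             break
--
--     return total_time
-- ===== SOURCE B (Python) =====
-- def cross_bridge(people):
--     # Round-based reformulation: each "round" pairs up the current level of the
--     # queue front-to-back; the maxes are appended behind an odd leftover.
--     # Note: unlike A, B does not sort `people` in place (return value only).
--     level = sorted(people)
--     total = 0
--     while len(level) > 1:
--         maxes = [max(a, b) for a, b in zip(level[::2], level[1::2])]
--         total += sum(maxes)
--         level = ([level[-1]] if len(level) % 2 else []) + maxes
--     if level:
--         total += level[0]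
--     return total
-- ===== Notes on version B (the rewrite author's own statement) =====
-- stated objective: faster
-- what changed: Replaces A's O(n^2) one-pair-at-a-time queue mutation (list.remove twice + append per step) with a round-based pass that pairs the whole level at once via slicing, summing the maxes per round; A also sorts its argument in place, B does not (return value only).
import Mathlib
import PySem

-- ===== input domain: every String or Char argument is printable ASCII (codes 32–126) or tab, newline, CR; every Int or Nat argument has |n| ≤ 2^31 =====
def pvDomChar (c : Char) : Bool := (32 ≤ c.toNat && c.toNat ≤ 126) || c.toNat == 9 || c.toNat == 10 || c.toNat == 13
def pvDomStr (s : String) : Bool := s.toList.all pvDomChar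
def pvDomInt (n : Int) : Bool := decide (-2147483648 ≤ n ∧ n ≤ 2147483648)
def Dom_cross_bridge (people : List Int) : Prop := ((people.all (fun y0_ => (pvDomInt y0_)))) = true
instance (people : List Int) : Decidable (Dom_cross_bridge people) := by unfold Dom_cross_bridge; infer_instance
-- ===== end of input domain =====

-- B replaces A's one-pair-at-a-time queue mutation by a round-based pass (faster);
-- A sorts its argument in place, B does not: the equivalence proved is about the RETURN value.

-- ===== PORT A =====
-- A's while loop over the mutated list `people`: with len >= 2, time = max(people[0], people[1]),
-- the two front elements are removed (people.remove(people[0]) twice removes exactly the fronts)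
-- and `time` is appended; with exactly one element the loop adds it and breaks; empty: loop ends.
def crossGo (people : List Int) (total : Int) : Int :=
  match people with
  | [] => total
  | [x] => total + x
  | a :: b :: rest => crossGo (rest ++ [max a b]) (total + max a b)
termination_by people.length
decreasing_by simp

def cross_bridge (people : List Int) : Int :=
  crossGo (PySem.List.sorted people (fun x => x) false) 0

-- ===== PORT B =====
-- level[::2] and level[1::2] of Source B, by two-step structural recursion
def pvEvens (l : List Int) : List Int :=
  match l with
  | [] => []
  | [x] => [x]
  | x :: _ :: r => x :: pvEvens r

def pvOdds (l : List Int) : List Int :=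
  match l with
  | [] => []
  | [_] => []
  | _ :: y :: r => y :: pvOdds r

-- maxes = [max(a,b) for a,b in zip(level[::2], level[1::2])]
def pvMaxes (l : List Int) : List Int := List.zipWith max (pvEvens l) (pvOdds l)

-- length facts; cited by crossRounds' decreasing_by, so they stay above the port
lemma pvEvens_length (l : List Int) : (pvEvens l).length = (l.length + 1) / 2 := by
  fun_induction pvEvens l <;> simp_all <;> omega

lemma pvOdds_length (l : List Int) : (pvOdds l).length = l.length / 2 := by
  fun_induction pvOdds l <;> simp_all <;> omega

lemma pvMaxes_length (l : List Int) : (pvMaxes l).length = l.length / 2 := by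
  simp [pvMaxes, pvEvens_length, pvOdds_length]; omega

-- the while loop of Source B; level[-1] is ported as getLastD 0, exact since len(level) > 1 there
def crossRounds (level : List Int) (total : Int) : Int :=
  if _h : level.length > 1 then
    crossRounds ((if level.length % 2 == 1 then [level.getLastD 0] else []) ++ pvMaxes level)
      (total + (pvMaxes level).sum)
  else
    match level with
    | [] => total
    | x :: _ => total + x
termination_by level.length
decreasing_by
  have he := pvMaxes_length level
  rcases Nat.even_or_odd level.length with hp | hp <;>
    simp_all [Nat.even_iff, Nat.odd_iff] <;> omega

def cross_bridge_alt (people : List Int) : Int :=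
  crossRounds (PySem.List.sorted people (fun x => x) false) 0

-- ===== PRECONDITION & SPEC =====
def Spec_cross_bridge (people : List Int) (out : Int) : Prop := out = cross_bridge_alt people
instance (people : List Int) (out : Int) : Decidable (Spec_cross_bridge people out) := by unfold Spec_cross_bridge; infer_instance

-- ===== CLAIM (what is proved, stated in full; the proofs are below) =====
def Claim_equal_cross_bridge : Prop := ∀ (people : List Int), Dom_cross_bridge people → Spec_cross_bridge people (cross_bridge people)

-- ===== LEMMAS AND PROOFS =====

-- one full round of the queue process: consuming the current level pair-by-pair
-- (with already-produced maxes `acc` waiting behind it) equals jumping to the next level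
lemma crossGo_round (l acc : List Int) (t : Int) :
    crossGo (l ++ acc) t =
      crossGo ((if l.length % 2 == 1 then [l.getLastD 0] else []) ++ (acc ++ pvMaxes l))
        (t + (pvMaxes l).sum) := by
  fun_induction pvEvens l generalizing acc t with
  | case1 => simp [pvMaxes, pvEvens, pvOdds]
  | case2 x => simp [pvMaxes, pvEvens, pvOdds]
  | case3 a b r ih =>
      have hstep : crossGo (a :: b :: (r ++ acc)) t
          = crossGo (r ++ (acc ++ [max a b])) (t + max a b) := by
        rw [crossGo.eq_def]; simp [List.append_assoc]
      simp only [List.cons_append]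
      rw [hstep, ih]
      have hm : pvMaxes (a :: b :: r) = max a b :: pvMaxes r := by
        simp [pvMaxes, pvEvens, pvOdds]
      have hlen : (a :: b :: r).length % 2 = r.length % 2 := by simp; omega
      cases r with
      | nil => simp [pvMaxes, pvEvens, pvOdds]
      | cons c r' =>
          have hirrel : ∀ (t : List Int) (d x y : Int), (d :: t).getLastD x = (d :: t).getLastD y := by
            intro t d x y
            rw [List.getLastD_eq_getLast?, List.getLastD_eq_getLast?]
            cases hq : (d :: t).getLast? with
            | none => simp at hq
            | some v => simp
          have hlast : (a :: b :: c :: r').getLastD 0 = (c :: r').getLastD 0 := by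
            rw [List.getLastD_cons, List.getLastD_cons]; exact hirrel r' c b 0
          rw [hm, hlen, hlast]
          congr 1
          · simp [List.append_assoc]
          · simp [List.sum_cons]; ring

lemma crossGo_eq_crossRounds (l : List Int) (t : Int) : crossGo l t = crossRounds l t := by
  by_cases h : l.length > 1
  · have hr : crossRounds l t =
        crossRounds ((if l.length % 2 == 1 then [l.getLastD 0] else []) ++ pvMaxes l)
          (t + (pvMaxes l).sum) := by
      rw [crossRounds]; simp [h]
    have hg := crossGo_round l [] t
    simp only [List.append_nil, List.nil_append] at hg
    rw [hr, hg]
    exact crossGo_eq_crossRounds _ _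
  · rw [crossRounds.eq_def]
    simp only [h, dite_false]
    cases l with
    | nil => rw [crossGo.eq_def]
    | cons x tl =>
        cases tl with
        | nil => rw [crossGo.eq_def]
        | cons y tl' => simp at h
termination_by l.length
decreasing_by
  have he := pvMaxes_length l
  rcases Nat.even_or_odd l.length with hp | hp <;>
    simp_all [Nat.even_iff, Nat.odd_iff] <;> omega

-- ===== VERDICT (by name: the statement is the Claim_ definition above) =====
theorem cross_bridge_spec : Claim_equal_cross_bridge := by
  intro people _
  unfold Spec_cross_bridge cross_bridge cross_bridge_alt
  exact crossGo_eq_crossRounds _ 0
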